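-- pv_equiv track=rewrite | github.com/RyanF139/Object_Detection | object-detection-v3.py | check_line_cross
-- ===== SOURCE A (Python) =====
-- def point_side_of_line(px, py, x1, y1, x2, y2):
--     return (x2 - x1) * (py - y1) - (y2 - y1) * (px - x1)
--
-- def check_line_cross(history, line_pts, line_in_dir):
--     if len(history) < 2:
--         return None
--     (lx1, ly1), (lx2, ly2) = line_pts
--     sides = [
--         point_side_of_line(px, py, lx1, ly1, lx2, ly2)
--         for px, py in history
--     ]
--     last_direction = None
--     for i in range(1, len(sides)):
--         prev = sides[i - 1]
--         curr = sides[i]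
--         if prev == 0 or curr == 0:
--             continue
--         if (prev > 0 and curr > 0) or (prev < 0 and curr < 0):
--             continue
--         crossed_a_to_b = (prev > 0 and curr < 0)
--         if line_in_dir == "A":
--             last_direction = "IN" if crossed_a_to_b else "OUT"
--         else:
--             last_direction = "IN" if not crossed_a_to_b else "OUT"
--     return last_direction
-- ===== SOURCE B (Python) =====
-- def check_line_cross(history, line_pts, line_in_dir):
--     # Scan consecutive pairs of the reversed history and return on the first
--     # crossing found (= last crossing of the forward scan).
--     if len(history) < 2:
--         return None
--     (lx1, ly1), (lx2, ly2) = line_pts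
--
--     def side(p):
--         px, py = p
--         return (lx2 - lx1) * (py - ly1) - (ly2 - ly1) * (px - lx1)
--
--     rev = history[::-1]
--     for curr_pt, prev_pt in zip(rev, rev[1:]):
--         prev, curr = side(prev_pt), side(curr_pt)
--         if (prev > 0 and curr < 0) or (prev < 0 and curr > 0):
--             crossed_a_to_b = prev > 0
--             if line_in_dir == "A":
--                 return "IN" if crossed_a_to_b else "OUT"
--             return "OUT" if crossed_a_to_b else "IN"
--     return None
-- ===== Notes on version B (the rewrite author's own statement) =====
-- stated objective: alternative
-- what changed: B drops A's precomputed sides list and accumulate-last forward loop: it zips the reversed history with its own tail and returns on the FIRST crossing pair found (early exit), which is the last crossing of A's forward scan.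
import Mathlib
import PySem

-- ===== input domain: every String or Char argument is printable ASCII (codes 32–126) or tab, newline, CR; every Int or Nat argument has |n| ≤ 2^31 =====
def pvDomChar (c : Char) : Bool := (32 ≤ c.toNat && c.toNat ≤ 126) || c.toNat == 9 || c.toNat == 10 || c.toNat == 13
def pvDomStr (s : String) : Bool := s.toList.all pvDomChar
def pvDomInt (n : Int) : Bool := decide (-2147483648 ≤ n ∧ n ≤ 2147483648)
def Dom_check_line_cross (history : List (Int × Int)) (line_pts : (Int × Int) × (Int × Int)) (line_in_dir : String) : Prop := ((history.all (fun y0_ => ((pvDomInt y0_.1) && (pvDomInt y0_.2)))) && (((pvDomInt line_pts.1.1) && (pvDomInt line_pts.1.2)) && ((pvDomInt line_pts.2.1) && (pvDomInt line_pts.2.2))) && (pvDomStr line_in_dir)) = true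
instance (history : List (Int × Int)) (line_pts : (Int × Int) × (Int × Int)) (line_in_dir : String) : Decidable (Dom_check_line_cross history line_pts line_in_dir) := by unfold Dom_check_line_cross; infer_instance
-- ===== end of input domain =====

-- B scans the consecutive pairs of the REVERSED history and returns on the first
-- crossing found (the forward scan's last crossing), instead of A's full forward
-- pass over a precomputed sides list that overwrites last_direction (objective: alternative).

-- ===== PORT A =====
def point_side_of_line (px py x1 y1 x2 y2 : Int) : Int :=
  (x2 - x1) * (py - y1) - (y2 - y1) * (px - x1)

def check_line_cross (history : List (Int × Int)) (line_pts : (Int × Int) × (Int × Int)) (line_in_dir : String) : Option String :=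
  if history.length < 2 then none
  else
    let lx1 := line_pts.1.1; let ly1 := line_pts.1.2
    let lx2 := line_pts.2.1; let ly2 := line_pts.2.2
    let sides := history.map (fun p => point_side_of_line p.1 p.2 lx1 ly1 lx2 ly2)
    (PySem.List.pyRange 1 (sides.length : Int) 1).foldl
      (fun last_direction i =>
        let prev := PySem.List.pyGetD sides (i - 1) 0  -- index always in range in A
        let curr := PySem.List.pyGetD sides i 0
        if prev = 0 ∨ curr = 0 then last_direction
        else if (prev > 0 ∧ curr > 0) ∨ (prev < 0 ∧ curr < 0) then last_direction
        else
          let crossed_a_to_b := prev > 0 ∧ curr < 0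
          if line_in_dir == "A" then some (if crossed_a_to_b then "IN" else "OUT")
          else some (if ¬ crossed_a_to_b then "IN" else "OUT"))
      none

-- ===== PORT B =====
def bSide (lx1 ly1 lx2 ly2 : Int) (p : Int × Int) : Int :=
  (lx2 - lx1) * (p.2 - ly1) - (ly2 - ly1) * (p.1 - lx1)

-- walk the reversed history pairwise (zip(rev, rev[1:])), early return on first crossing
def bLoop (lx1 ly1 lx2 ly2 : Int) (lid : String) : List (Int × Int) → Option String
  | c :: p :: rest =>
    let prev := bSide lx1 ly1 lx2 ly2 p
    let curr := bSide lx1 ly1 lx2 ly2 c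
    if (prev > 0 ∧ curr < 0) ∨ (prev < 0 ∧ curr > 0) then
      if lid == "A" then some (if prev > 0 then "IN" else "OUT")
      else some (if prev > 0 then "OUT" else "IN")
    else bLoop lx1 ly1 lx2 ly2 lid (p :: rest)
  | _ => none

def check_line_cross_alt (history : List (Int × Int)) (line_pts : (Int × Int) × (Int × Int)) (line_in_dir : String) : Option String :=
  if history.length < 2 then none
  else bLoop line_pts.1.1 line_pts.1.2 line_pts.2.1 line_pts.2.2 line_in_dir history.reverse

-- ===== PRECONDITION & SPEC =====
def Spec_check_line_cross (history : List (Int × Int)) (line_pts : (Int × Int) × (Int × Int)) (line_in_dir : String) (out : Option String) : Prop := out = check_line_cross_alt history line_pts line_in_dir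
instance (history : List (Int × Int)) (line_pts : (Int × Int) × (Int × Int)) (line_in_dir : String) (out : Option String) : Decidable (Spec_check_line_cross history line_pts line_in_dir out) := by unfold Spec_check_line_cross; infer_instance

-- ===== CLAIM (what is proved, stated in full; the proofs are below) =====
def Claim_equal_check_line_cross : Prop := ∀ (history : List (Int × Int)) (line_pts : (Int × Int) × (Int × Int)) (line_in_dir : String), Dom_check_line_cross history line_pts line_in_dir → Spec_check_line_cross history line_pts line_in_dir (check_line_cross history line_pts line_in_dir)

-- ===== LEMMAS AND PROOFS =====

-- A's indexed loop over range(1, len(sides)) reads exactly the consecutive pairs.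
theorem map_pairs_pyRange (xs : List Int) :
    (PySem.List.pyRange 1 (xs.length : Int) 1).map
      (fun i => (PySem.List.pyGetD xs (i - 1) 0, PySem.List.pyGetD xs i 0))
    = xs.zip xs.tail := by
  apply List.ext_getElem
  · simp [PySem.List.length_pyRange_one]
  · intro k h1 h2
    simp only [List.getElem_map, PySem.List.getElem_pyRange_one, List.getElem_zip, List.getElem_tail]
    simp [PySem.List.length_pyRange_one] at h1
    have e1 : (1 : Int) + k - 1 = ((k : Nat) : Int) := by omega
    have e2 : (1 : Int) + k = ((k + 1 : Nat) : Int) := by omega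
    rw [e1, e2, PySem.List.pyGetD_eq_getElem xs 0 (by omega) (by simp; omega),
        PySem.List.pyGetD_eq_getElem xs 0 (by omega) (by simp; omega)]
    simp

-- "keep the last hit" foldl = first hit of the reversed list
theorem foldl_last_eq_find_reverse {α : Type} (C : α → Bool) (v : α → Option String) :
    ∀ (l : List α) (a : Option String),
      l.foldl (fun acc x => if C x then v x else acc) a
        = (match l.reverse.find? C with | some x => v x | none => a) := by
  intro l
  induction l with
  | nil => intro a; simp
  | cons x xs ih =>
    intro a
    simp only [List.foldl_cons, List.reverse_cons, List.find?_append, ih]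
    cases h : xs.reverse.find? C with
    | some y => simp [Option.or]
    | none =>
      simp only [Option.or]
      by_cases hx : C x = true
      · simp [List.find?, hx]
      · simp [List.find?, hx]

-- bLoop is find-first over the consecutive pairs of its argument
theorem bLoop_eq_find (lx1 ly1 lx2 ly2 : Int) (lid : String) (r : List (Int × Int)) :
    bLoop lx1 ly1 lx2 ly2 lid r
      = (match (r.zip r.tail).find?
            (fun cp => decide ((bSide lx1 ly1 lx2 ly2 cp.2 > 0 ∧ bSide lx1 ly1 lx2 ly2 cp.1 < 0)
                ∨ (bSide lx1 ly1 lx2 ly2 cp.2 < 0 ∧ bSide lx1 ly1 lx2 ly2 cp.1 > 0))) with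
         | some cp =>
            if lid == "A" then some (if bSide lx1 ly1 lx2 ly2 cp.2 > 0 then "IN" else "OUT")
            else some (if bSide lx1 ly1 lx2 ly2 cp.2 > 0 then "OUT" else "IN")
         | none => none) := by
  induction r with
  | nil => simp [bLoop]
  | cons c r' ih =>
    cases r' with
    | nil => simp [bLoop]
    | cons p rest =>
      by_cases h : (bSide lx1 ly1 lx2 ly2 p > 0 ∧ bSide lx1 ly1 lx2 ly2 c < 0)
          ∨ (bSide lx1 ly1 lx2 ly2 p < 0 ∧ bSide lx1 ly1 lx2 ly2 c > 0)
      · simp [bLoop, h]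
      · simp only [bLoop, List.zip_cons_cons, List.tail_cons, List.find?, if_neg h]
        rw [ih]
        simp [h]

-- consecutive pairs of the reversed list = swapped reversed pairs
theorem zip_tail_reverse {α : Type} (l : List α) :
    l.reverse.zip l.reverse.tail = ((l.zip l.tail).map Prod.swap).reverse := by
  apply List.ext_getElem
  · simp
  · intro k h1 h2
    simp only [List.getElem_zip, List.getElem_tail, List.getElem_reverse, List.getElem_map,
      List.getElem_zip, Prod.swap]
    simp at h1 h2
    have hz : (List.map Prod.swap (l.zip l.tail)).length = l.length - 1 := by simp
    congr 1 <;> exact getElem_congr rfl (by omega) (by omega)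

theorem check_line_cross_eq_alt (history : List (Int × Int)) (line_pts : (Int × Int) × (Int × Int)) (lid : String) :
    check_line_cross history line_pts lid = check_line_cross_alt history line_pts lid := by
  by_cases hl : history.length < 2
  · simp [check_line_cross, check_line_cross_alt, hl]
  · obtain ⟨⟨lx1, ly1⟩, lx2, ly2⟩ := line_pts
    simp only [check_line_cross, check_line_cross_alt, if_neg hl]
    set s : Int × Int → Int := fun p => point_side_of_line p.1 p.2 lx1 ly1 lx2 ly2 with hs
    set C : (Int × Int) × (Int × Int) → Bool :=
      fun pp => decide ((s pp.1 > 0 ∧ s pp.2 < 0) ∨ (s pp.1 < 0 ∧ s pp.2 > 0)) with hC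
    set v : (Int × Int) × (Int × Int) → Option String := fun pp =>
      if lid == "A" then some (if s pp.1 > 0 ∧ s pp.2 < 0 then "IN" else "OUT")
      else some (if ¬ (s pp.1 > 0 ∧ s pp.2 < 0) then "IN" else "OUT") with hv
    set g : Option String → Int × Int → Option String := fun acc pc =>
      if pc.1 = 0 ∨ pc.2 = 0 then acc
      else if (pc.1 > 0 ∧ pc.2 > 0) ∨ (pc.1 < 0 ∧ pc.2 < 0) then acc
      else
        if lid == "A" then some (if pc.1 > 0 ∧ pc.2 < 0 then "IN" else "OUT")
        else some (if ¬ (pc.1 > 0 ∧ pc.2 < 0) then "IN" else "OUT") with hg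
    have h1 : (PySem.List.pyRange 1 ((history.map s).length : Int) 1).foldl
        (fun last_direction i =>
          let prev := PySem.List.pyGetD (history.map s) (i - 1) 0
          let curr := PySem.List.pyGetD (history.map s) i 0
          if prev = 0 ∨ curr = 0 then last_direction
          else if (prev > 0 ∧ curr > 0) ∨ (prev < 0 ∧ curr < 0) then last_direction
          else
            let crossed_a_to_b := prev > 0 ∧ curr < 0
            if lid == "A" then some (if crossed_a_to_b then "IN" else "OUT")
            else some (if ¬ crossed_a_to_b then "IN" else "OUT"))
        none
      = ((PySem.List.pyRange 1 ((history.map s).length : Int) 1).map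
          (fun i => (PySem.List.pyGetD (history.map s) (i - 1) 0,
                     PySem.List.pyGetD (history.map s) i 0))).foldl g none := by
      rw [List.foldl_map]
    rw [h1, map_pairs_pyRange (history.map s),
        show (history.map s).tail = history.tail.map s from List.map_tail.symm, List.zip_map,
        List.foldl_map]
    have h2 : (fun (acc : Option String) (pp : (Int × Int) × (Int × Int)) => g acc (Prod.map s s pp))
        = fun acc pp => if C pp then v pp else acc := by
      funext acc pp
      simp only [hg, hC, hv, Prod.map, decide_eq_true_eq]
      split_ifs <;> first | rfl | omega
    rw [h2, foldl_last_eq_find_reverse C v, bLoop_eq_find, zip_tail_reverse, ← List.map_reverse,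
        List.find?_map]
    have h3 : ((fun cp => decide ((bSide lx1 ly1 lx2 ly2 cp.2 > 0 ∧ bSide lx1 ly1 lx2 ly2 cp.1 < 0)
                ∨ (bSide lx1 ly1 lx2 ly2 cp.2 < 0 ∧ bSide lx1 ly1 lx2 ly2 cp.1 > 0))) ∘ Prod.swap) = C := by
      funext pp; rfl
    rw [h3]
    cases hf : (history.zip history.tail).reverse.find? C with
    | none => rfl
    | some pp =>
      have hcp := List.find?_some hf
      simp only [hC, decide_eq_true_eq] at hcp
      simp only [Option.map_some, hv]
      have hsw1 : bSide lx1 ly1 lx2 ly2 (Prod.swap pp).2 = s pp.1 := rfl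
      rw [hsw1]
      rcases hcp with ⟨h4, h5⟩ | ⟨h4, h5⟩
      · by_cases hA : lid == "A" <;> simp [hA, h4, h5]
      · have h6 : ¬ s pp.1 > 0 := by omega
        by_cases hA : lid == "A" <;> simp [hA, h6]

-- ===== VERDICT (by name: the statement is the Claim_ definition above) =====
theorem check_line_cross_spec : Claim_equal_check_line_cross := by
  intro history line_pts line_in_dir _
  exact check_line_cross_eq_alt history line_pts line_in_dir
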